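-- pv_equiv track=rewrite | github.com/openappsys/exiftool-rs-wrapper | scripts/generate_tags_camelcase.py | categorize_tag
-- ===== SOURCE A (Python) =====
-- def categorize_tag(tag):
--     """根据标签名粗略分类"""
--     tag_lower = tag.lower()
--
--     # 厂商标签
--     if tag.startswith("Canon") or tag.startswith("Canon"):
--         return "vendors/canon"
--     elif tag.startswith("Nikon") or tag.startswith("Nikon"):
--         return "vendors/nikon"
--     elif tag.startswith("Sony") or tag.startswith("Sony"):
--         return "vendors/sony"
--     elif tag.startswith("Fuji") or tag.startswith("Fuji") or tag.startswith("Fujifilm"):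
--         return "vendors/fuji"
--     elif tag.startswith("Olympus") or tag.startswith("Olympus"):
--         return "vendors/olympus"
--     elif tag.startswith("Panasonic") or tag.startswith("Panasonic"):
--         return "vendors/panasonic"
--
--     # 标准标签
--     elif any(x in tag for x in ["EXIF", "Exif", "exif"]):
--         return "standard/exif"
--     elif any(x in tag for x in ["IPTC", "Iptc", "iptc"]):
--         return "standard/iptc"
--     elif any(x in tag for x in ["XMP", "Xmp", "xmp"]):
--         return "standard/xmp"
--     elif any(x in tag for x in ["GPS", "Gps", "gps"]):
--         return "standard/gps"
--
--     # 文件格式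
--     elif any(x in tag for x in ["PDF", "Pdf", "pdf"]):
--         return "formats/pdf"
--     elif any(x in tag for x in ["JPEG", "Jpeg", "jpeg", "JPG", "Jpg", "jpg"]):
--         return "formats/jpeg"
--     elif any(x in tag for x in ["PNG", "Png", "png"]):
--         return "formats/png"
--     elif any(x in tag for x in ["GIF", "Gif", "gif"]):
--         return "formats/gif"
--     elif any(x in tag for x in ["TIFF", "Tiff", "tiff"]):
--         return "formats/tiff"
--     elif any(x in tag for x in ["DNG", "Dng", "dng"]):
--         return "formats/dng"
--     elif any(x in tag for x in ["RAW", "Raw", "raw"]):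
--         return "formats/raw"
--
--     # 视频
--     elif any(
--         x in tag
--         for x in [
--             "MOV",
--             "Mov",
--             "mov",
--             "MP4",
--             "Mp4",
--             "mp4",
--             "AVI",
--             "Avi",
--             "avi",
--             "MKV",
--             "Mkv",
--             "mkv",
--         ]
--     ):
--         return "video/quicktime"
--
--     # 音频
--     elif any(
--         x in tag
--         for x in [
--             "MP3",
--             "Mp3",
--             "mp3",
--             "WAV",
--             "Wav",
--             "wav",
--             "AAC",
--             "Aac",
--             "aac",
--             "FLAC",
--             "Flac",
--             "flac",
--         ]
--     ):
--         return "audio/id3"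
--
--     # 其他分类到 other
--     else:
--         return "other"
-- ===== SOURCE B (Python) =====
-- # Different algorithm: one left-to-right scan over the tag's positions, checking a
-- # keyword->priority dictionary at each position and keeping the minimum priority seen;
-- # the category of the minimum matched priority equals A's first-matching-rule answer.
-- _CATS = [
--     "vendors/canon", "vendors/nikon", "vendors/sony", "vendors/fuji",
--     "vendors/olympus", "vendors/panasonic",
--     "standard/exif", "standard/iptc", "standard/xmp", "standard/gps",
--     "formats/pdf", "formats/jpeg", "formats/png", "formats/gif",
--     "formats/tiff", "formats/dng", "formats/raw",
--     "video/quicktime", "audio/id3",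
-- ]
--
-- _PREFIX = {"Canon": 0, "Nikon": 1, "Sony": 2, "Fuji": 3, "Fujifilm": 3,
--            "Olympus": 4, "Panasonic": 5}
--
-- _SUB = {
--     "EXIF": 6, "Exif": 6, "exif": 6,
--     "IPTC": 7, "Iptc": 7, "iptc": 7,
--     "XMP": 8, "Xmp": 8, "xmp": 8,
--     "GPS": 9, "Gps": 9, "gps": 9,
--     "PDF": 10, "Pdf": 10, "pdf": 10,
--     "JPEG": 11, "Jpeg": 11, "jpeg": 11, "JPG": 11, "Jpg": 11, "jpg": 11,
--     "PNG": 12, "Png": 12, "png": 12,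
--     "GIF": 13, "Gif": 13, "gif": 13,
--     "TIFF": 14, "Tiff": 14, "tiff": 14,
--     "DNG": 15, "Dng": 15, "dng": 15,
--     "RAW": 16, "Raw": 16, "raw": 16,
--     "MOV": 17, "Mov": 17, "mov": 17, "MP4": 17, "Mp4": 17, "mp4": 17,
--     "AVI": 17, "Avi": 17, "avi": 17, "MKV": 17, "Mkv": 17, "mkv": 17,
--     "MP3": 18, "Mp3": 18, "mp3": 18, "WAV": 18, "Wav": 18, "wav": 18,
--     "AAC": 18, "Aac": 18, "aac": 18, "FLAC": 18, "Flac": 18, "flac": 18,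
-- }
--
--
-- def categorize_tag(tag):
--     best = len(_CATS)
--     for kw, pri in _PREFIX.items():
--         if tag.startswith(kw):
--             best = min(best, pri)
--     for i in range(len(tag)):
--         for kw, pri in _SUB.items():
--             if tag.startswith(kw, i):
--                 best = min(best, pri)
--     return _CATS[best] if best < len(_CATS) else "other"
-- ===== Notes on version B (the rewrite author's own statement) =====
-- stated objective: alternative
-- what changed: Replaced the ordered if/elif chain of per-rule substring scans by a single left-to-right scan over the tag's positions that checks a keyword-to-priority dictionary at each position and keeps the minimum matched priority; the category of that minimum equals the first matching rule.
import Mathlib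
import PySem

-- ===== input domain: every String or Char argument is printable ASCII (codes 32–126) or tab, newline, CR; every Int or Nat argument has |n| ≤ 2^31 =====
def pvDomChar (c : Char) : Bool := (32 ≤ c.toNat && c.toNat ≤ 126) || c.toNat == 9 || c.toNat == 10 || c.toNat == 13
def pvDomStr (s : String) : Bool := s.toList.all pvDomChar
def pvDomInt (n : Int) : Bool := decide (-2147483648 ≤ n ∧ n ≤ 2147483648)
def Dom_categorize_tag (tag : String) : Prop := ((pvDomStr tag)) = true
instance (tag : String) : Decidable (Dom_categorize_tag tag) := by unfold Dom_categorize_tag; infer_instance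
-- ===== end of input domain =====

-- B replaces A's ordered if/elif chain of substring scans by a single scan over the tag's
-- positions with a keyword→priority table, keeping the minimum matched priority (alternative).

-- ===== PORT A =====
def categorize_tag (tag : String) : String :=
  let _tag_lower := PySem.Str.lower tag
  if PySem.Str.startswith tag "Canon" || PySem.Str.startswith tag "Canon" then "vendors/canon"
  else if PySem.Str.startswith tag "Nikon" || PySem.Str.startswith tag "Nikon" then "vendors/nikon"
  else if PySem.Str.startswith tag "Sony" || PySem.Str.startswith tag "Sony" then "vendors/sony"
  else if PySem.Str.startswith tag "Fuji" || PySem.Str.startswith tag "Fuji" || PySem.Str.startswith tag "Fujifilm" then "vendors/fuji"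
  else if PySem.Str.startswith tag "Olympus" || PySem.Str.startswith tag "Olympus" then "vendors/olympus"
  else if PySem.Str.startswith tag "Panasonic" || PySem.Str.startswith tag "Panasonic" then "vendors/panasonic"
  else if List.any ["EXIF", "Exif", "exif"] (fun x => PySem.Str.isIn x tag) then "standard/exif"
  else if List.any ["IPTC", "Iptc", "iptc"] (fun x => PySem.Str.isIn x tag) then "standard/iptc"
  else if List.any ["XMP", "Xmp", "xmp"] (fun x => PySem.Str.isIn x tag) then "standard/xmp"
  else if List.any ["GPS", "Gps", "gps"] (fun x => PySem.Str.isIn x tag) then "standard/gps"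
  else if List.any ["PDF", "Pdf", "pdf"] (fun x => PySem.Str.isIn x tag) then "formats/pdf"
  else if List.any ["JPEG", "Jpeg", "jpeg", "JPG", "Jpg", "jpg"] (fun x => PySem.Str.isIn x tag) then "formats/jpeg"
  else if List.any ["PNG", "Png", "png"] (fun x => PySem.Str.isIn x tag) then "formats/png"
  else if List.any ["GIF", "Gif", "gif"] (fun x => PySem.Str.isIn x tag) then "formats/gif"
  else if List.any ["TIFF", "Tiff", "tiff"] (fun x => PySem.Str.isIn x tag) then "formats/tiff"
  else if List.any ["DNG", "Dng", "dng"] (fun x => PySem.Str.isIn x tag) then "formats/dng"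
  else if List.any ["RAW", "Raw", "raw"] (fun x => PySem.Str.isIn x tag) then "formats/raw"
  else if List.any ["MOV", "Mov", "mov", "MP4", "Mp4", "mp4", "AVI", "Avi", "avi", "MKV", "Mkv", "mkv"] (fun x => PySem.Str.isIn x tag) then "video/quicktime"
  else if List.any ["MP3", "Mp3", "mp3", "WAV", "Wav", "wav", "AAC", "Aac", "aac", "FLAC", "Flac", "flac"] (fun x => PySem.Str.isIn x tag) then "audio/id3"
  else "other"

-- ===== PORT B =====
def pvCats : List String := ["vendors/canon", "vendors/nikon", "vendors/sony", "vendors/fuji", "vendors/olympus", "vendors/panasonic", "standard/exif", "standard/iptc", "standard/xmp", "standard/gps", "formats/pdf", "formats/jpeg", "formats/png", "formats/gif", "formats/tiff", "formats/dng", "formats/raw", "video/quicktime", "audio/id3"]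

def pvPrefix : List (String × Nat) := [("Canon", 0), ("Nikon", 1), ("Sony", 2), ("Fuji", 3), ("Fujifilm", 3), ("Olympus", 4), ("Panasonic", 5)]

def pvSub : List (String × Nat) := [("EXIF", 6), ("Exif", 6), ("exif", 6), ("IPTC", 7), ("Iptc", 7), ("iptc", 7), ("XMP", 8), ("Xmp", 8), ("xmp", 8), ("GPS", 9), ("Gps", 9), ("gps", 9), ("PDF", 10), ("Pdf", 10), ("pdf", 10), ("JPEG", 11), ("Jpeg", 11), ("jpeg", 11), ("JPG", 11), ("Jpg", 11), ("jpg", 11), ("PNG", 12), ("Png", 12), ("png", 12), ("GIF", 13), ("Gif", 13), ("gif", 13), ("TIFF", 14), ("Tiff", 14), ("tiff", 14), ("DNG", 15), ("Dng", 15), ("dng", 15), ("RAW", 16), ("Raw", 16), ("raw", 16), ("MOV", 17), ("Mov", 17), ("mov", 17), ("MP4", 17), ("Mp4", 17), ("mp4", 17), ("AVI", 17), ("Avi", 17), ("avi", 17), ("MKV", 17), ("Mkv", 17), ("mkv", 17), ("MP3", 18), ("Mp3", 18), ("mp3", 18), ("WAV", 18), ("Wav", 18), ("wav", 18), ("AAC",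 18), ("Aac", 18), ("aac", 18), ("FLAC", 18), ("Flac", 18), ("flac", 18)]

-- Source B: best = len(_CATS); the two loops min-update best; final guarded index.
-- Python's tag.startswith(kw, i) has no PySem primitive; for 0 ≤ i < len(tag) it is exactly
-- a prefix test on the drop-i slice, ported by hand as startswith (slice tag i none) kw.
def categorize_tag_alt (tag : String) : String :=
  let best0 := pvCats.length
  let best1 := pvPrefix.foldl (fun b kp => if PySem.Str.startswith tag kp.1 then min b kp.2 else b) best0
  let best2 := (PySem.List.pyRange 0 (PySem.Str.len tag) 1).foldl
      (fun b i => pvSub.foldl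
        (fun b kp => if PySem.Str.startswith (PySem.Str.slice tag (some i) none) kp.1 then min b kp.2 else b) b) best1
  if best2 < pvCats.length then pvCats.getD best2 "other" else "other"

-- ===== PRECONDITION & SPEC =====
def Spec_categorize_tag (tag : String) (out : String) : Prop := out = categorize_tag_alt tag
instance (tag : String) (out : String) : Decidable (Spec_categorize_tag tag out) := by unfold Spec_categorize_tag; infer_instance

-- ===== CLAIM (what is proved, stated in full; the proofs are below) =====
def Claim_equal_categorize_tag : Prop := ∀ (tag : String), Dom_categorize_tag tag → Spec_categorize_tag tag (categorize_tag tag)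

-- ===== LEMMAS AND PROOFS =====

-- the multiset of matched priorities, in the order B's loops visit them
def pvL (tag : String) : List Nat :=
  (pvPrefix.filter (fun kp => PySem.Str.startswith tag kp.1)).map Prod.snd
  ++ (PySem.List.pyRange 0 (PySem.Str.len tag) 1).flatMap
       (fun i => (pvSub.filter
          (fun kp => PySem.Str.startswith (PySem.Str.slice tag (some i) none) kp.1)).map Prod.snd)

lemma pv_foldl_minupd (p : String × Nat → Bool) : ∀ (l : List (String × Nat)) (b : Nat),
    l.foldl (fun b kp => if p kp then min b kp.2 else b) b
      = List.foldl min b ((l.filter p).map Prod.snd) := by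
  intro l
  induction l with
  | nil => intro b; rfl
  | cons kp t ih => intro b; by_cases h : p kp <;> simp [h, ih]

lemma pv_foldl_flat (g : Int → List Nat) : ∀ (is : List Int) (b : Nat),
    is.foldl (fun b i => List.foldl min b (g i)) b = List.foldl min b (is.flatMap g) := by
  intro is
  induction is with
  | nil => intro b; rfl
  | cons i t ih => intro b; simp [List.foldl_append, ih]

lemma pv_foldl_min_le_init : ∀ (L : List Nat) (c : Nat), List.foldl min c L ≤ c := by
  intro L
  induction L with
  | nil => intro c; simp
  | cons a t ih => intro c; exact le_trans (ih (min c a)) (min_le_left _ _)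

lemma pv_foldl_min_le_mem : ∀ (L : List Nat) (c x : Nat), x ∈ L → List.foldl min c L ≤ x := by
  intro L
  induction L with
  | nil => intro c x hx; cases hx
  | cons a t ih =>
    intro c x hx
    rcases List.mem_cons.mp hx with h | h
    · subst h; exact le_trans (pv_foldl_min_le_init t (min c x)) (min_le_right _ _)
    · exact ih (min c a) x h

lemma pv_foldl_min_mem_or : ∀ (L : List Nat) (c : Nat),
    List.foldl min c L = c ∨ List.foldl min c L ∈ L := by
  intro L
  induction L with
  | nil => intro c; left; rfl
  | cons a t ih =>
    intro c
    rcases ih (min c a) with h | h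
    · rcases min_choice c a with hm | hm
      · left; rw [List.foldl_cons, h, hm]
      · right; rw [List.foldl_cons, h, hm]; exact List.mem_cons_self ..
    · right; exact List.mem_cons_of_mem _ h

lemma pv_min_eq (L : List Nat) (c k : Nat) (hkc : k < c) (hk : k ∈ L)
    (hlt : ∀ j, j < k → j ∉ L) : List.foldl min c L = k := by
  have h1 := pv_foldl_min_le_mem L c k hk
  rcases pv_foldl_min_mem_or L c with h | h
  · rw [h] at h1; omega
  · by_contra hne
    exact hlt _ (lt_of_le_of_ne h1 hne) h

lemma pv_alt_eq (tag : String) :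
    categorize_tag_alt tag =
      (if List.foldl min 19 (pvL tag) < 19 then pvCats.getD (List.foldl min 19 (pvL tag)) "other"
       else "other") := by
  have hlen : pvCats.length = 19 := rfl
  unfold categorize_tag_alt pvL
  simp only [pv_foldl_minupd, pv_foldl_flat, List.foldl_append, hlen]

lemma pv_L_lt (tag : String) : ∀ x ∈ pvL tag, x < 19 := by
  intro x hx
  unfold pvL at hx
  rcases List.mem_append.mp hx with h | h
  · rcases List.mem_map.mp h with ⟨kp, hkp, rfl⟩
    have h2 : kp.2 ∈ pvPrefix.map Prod.snd :=
      List.mem_map.mpr ⟨kp, (List.mem_filter.mp hkp).1, rfl⟩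
    simp [pvPrefix] at h2
    omega
  · rcases List.mem_flatMap.mp h with ⟨i, _, h1⟩
    rcases List.mem_map.mp h1 with ⟨kp, hkp, rfl⟩
    have h2 : kp.2 ∈ pvSub.map Prod.snd :=
      List.mem_map.mpr ⟨kp, (List.mem_filter.mp hkp).1, rfl⟩
    simp [pvSub] at h2
    omega

-- a keyword matches at some scan position iff 'kw in s' (Python's in), for kw ≠ ""
lemma pv_hit (s kw : List Char) (h : kw ≠ []) :
    (∃ x : Int, (0 ≤ x ∧ x < (s.length : Int)) ∧
        PySem.Chars.startswith (PySem.List.slice s (some x)) kw = true)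
      ↔ PySem.Chars.isIn kw s = true := by
  rw [← PySem.Chars.exists_prefix_drop_iff_isIn]
  constructor
  · rintro ⟨i, ⟨h0, _⟩, hsw⟩
    rw [PySem.List.slice_from s h0] at hsw
    exact ⟨i.toNat, (PySem.Chars.startswith_iff _ _).mp hsw⟩
  · rintro ⟨j, hj⟩
    have hjlt : j < s.length := by
      by_contra hge
      rw [List.drop_eq_nil_of_le (by omega)] at hj
      exact h (List.prefix_nil.mp hj)
    refine ⟨(j : Int), ⟨by omega, by exact_mod_cast hjlt⟩, ?_⟩
    rw [PySem.List.slice_from s (Int.natCast_nonneg j)]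
    simp only [Int.toNat_natCast]
    exact (PySem.Chars.startswith_iff _ _).mpr hj

lemma pv_mem0 (tag : String) : 0 ∈ pvL tag ↔ (PySem.Str.startswith tag "Canon" || PySem.Str.startswith tag "Canon") = true := by
  simp [pvL, pvPrefix, pvSub, PySem.List.mem_pyRange_one]

lemma pv_mem1 (tag : String) : 1 ∈ pvL tag ↔ (PySem.Str.startswith tag "Nikon" || PySem.Str.startswith tag "Nikon") = true := by
  simp [pvL, pvPrefix, pvSub, PySem.List.mem_pyRange_one]

lemma pv_mem2 (tag : String) : 2 ∈ pvL tag ↔ (PySem.Str.startswith tag "Sony" || PySem.Str.startswith tag "Sony") = true := by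
  simp [pvL, pvPrefix, pvSub, PySem.List.mem_pyRange_one]

lemma pv_mem3 (tag : String) : 3 ∈ pvL tag ↔ (PySem.Str.startswith tag "Fuji" || PySem.Str.startswith tag "Fuji" || PySem.Str.startswith tag "Fujifilm") = true := by
  simp [pvL, pvPrefix, pvSub, PySem.List.mem_pyRange_one]

lemma pv_mem4 (tag : String) : 4 ∈ pvL tag ↔ (PySem.Str.startswith tag "Olympus" || PySem.Str.startswith tag "Olympus") = true := by
  simp [pvL, pvPrefix, pvSub, PySem.List.mem_pyRange_one]

lemma pv_mem5 (tag : String) : 5 ∈ pvL tag ↔ (PySem.Str.startswith tag "Panasonic" || PySem.Str.startswith tag "Panasonic") = true := by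
  simp [pvL, pvPrefix, pvSub, PySem.List.mem_pyRange_one]

lemma pv_mem6 (tag : String) : 6 ∈ pvL tag ↔ (List.any ["EXIF", "Exif", "exif"] (fun x => PySem.Str.isIn x tag)) = true := by
  simp [pvL, pvPrefix, pvSub, PySem.List.mem_pyRange_one, and_or_left, exists_or]
  simp only [← String.length_toList]
  rw [pv_hit tag.toList ['E', 'X', 'I', 'F'] (by decide),
    pv_hit tag.toList ['E', 'x', 'i', 'f'] (by decide),
    pv_hit tag.toList ['e', 'x', 'i', 'f'] (by decide)]

lemma pv_mem7 (tag : String) : 7 ∈ pvL tag ↔ (List.any ["IPTC", "Iptc", "iptc"] (fun x => PySem.Str.isIn x tag)) = true := by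
  simp [pvL, pvPrefix, pvSub, PySem.List.mem_pyRange_one, and_or_left, exists_or]
  simp only [← String.length_toList]
  rw [pv_hit tag.toList ['I', 'P', 'T', 'C'] (by decide),
    pv_hit tag.toList ['I', 'p', 't', 'c'] (by decide),
    pv_hit tag.toList ['i', 'p', 't', 'c'] (by decide)]

lemma pv_mem8 (tag : String) : 8 ∈ pvL tag ↔ (List.any ["XMP", "Xmp", "xmp"] (fun x => PySem.Str.isIn x tag)) = true := by
  simp [pvL, pvPrefix, pvSub, PySem.List.mem_pyRange_one, and_or_left, exists_or]
  simp only [← String.length_toList]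
  rw [pv_hit tag.toList ['X', 'M', 'P'] (by decide),
    pv_hit tag.toList ['X', 'm', 'p'] (by decide),
    pv_hit tag.toList ['x', 'm', 'p'] (by decide)]

lemma pv_mem9 (tag : String) : 9 ∈ pvL tag ↔ (List.any ["GPS", "Gps", "gps"] (fun x => PySem.Str.isIn x tag)) = true := by
  simp [pvL, pvPrefix, pvSub, PySem.List.mem_pyRange_one, and_or_left, exists_or]
  simp only [← String.length_toList]
  rw [pv_hit tag.toList ['G', 'P', 'S'] (by decide),
    pv_hit tag.toList ['G', 'p', 's'] (by decide),
    pv_hit tag.toList ['g', 'p', 's'] (by decide)]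

lemma pv_mem10 (tag : String) : 10 ∈ pvL tag ↔ (List.any ["PDF", "Pdf", "pdf"] (fun x => PySem.Str.isIn x tag)) = true := by
  simp [pvL, pvPrefix, pvSub, PySem.List.mem_pyRange_one, and_or_left, exists_or]
  simp only [← String.length_toList]
  rw [pv_hit tag.toList ['P', 'D', 'F'] (by decide),
    pv_hit tag.toList ['P', 'd', 'f'] (by decide),
    pv_hit tag.toList ['p', 'd', 'f'] (by decide)]

lemma pv_mem11 (tag : String) : 11 ∈ pvL tag ↔ (List.any ["JPEG", "Jpeg", "jpeg", "JPG", "Jpg", "jpg"] (fun x => PySem.Str.isIn x tag)) = true := by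
  simp [pvL, pvPrefix, pvSub, PySem.List.mem_pyRange_one, and_or_left, exists_or]
  simp only [← String.length_toList]
  rw [pv_hit tag.toList ['J', 'P', 'E', 'G'] (by decide),
    pv_hit tag.toList ['J', 'p', 'e', 'g'] (by decide),
    pv_hit tag.toList ['j', 'p', 'e', 'g'] (by decide),
    pv_hit tag.toList ['J', 'P', 'G'] (by decide),
    pv_hit tag.toList ['J', 'p', 'g'] (by decide),
    pv_hit tag.toList ['j', 'p', 'g'] (by decide)]

lemma pv_mem12 (tag : String) : 12 ∈ pvL tag ↔ (List.any ["PNG", "Png", "png"] (fun x => PySem.Str.isIn x tag)) = true := by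
  simp [pvL, pvPrefix, pvSub, PySem.List.mem_pyRange_one, and_or_left, exists_or]
  simp only [← String.length_toList]
  rw [pv_hit tag.toList ['P', 'N', 'G'] (by decide),
    pv_hit tag.toList ['P', 'n', 'g'] (by decide),
    pv_hit tag.toList ['p', 'n', 'g'] (by decide)]

lemma pv_mem13 (tag : String) : 13 ∈ pvL tag ↔ (List.any ["GIF", "Gif", "gif"] (fun x => PySem.Str.isIn x tag)) = true := by
  simp [pvL, pvPrefix, pvSub, PySem.List.mem_pyRange_one, and_or_left, exists_or]
  simp only [← String.length_toList]
  rw [pv_hit tag.toList ['G', 'I', 'F'] (by decide),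
    pv_hit tag.toList ['G', 'i', 'f'] (by decide),
    pv_hit tag.toList ['g', 'i', 'f'] (by decide)]

lemma pv_mem14 (tag : String) : 14 ∈ pvL tag ↔ (List.any ["TIFF", "Tiff", "tiff"] (fun x => PySem.Str.isIn x tag)) = true := by
  simp [pvL, pvPrefix, pvSub, PySem.List.mem_pyRange_one, and_or_left, exists_or]
  simp only [← String.length_toList]
  rw [pv_hit tag.toList ['T', 'I', 'F', 'F'] (by decide),
    pv_hit tag.toList ['T', 'i', 'f', 'f'] (by decide),
    pv_hit tag.toList ['t', 'i', 'f', 'f'] (by decide)]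

lemma pv_mem15 (tag : String) : 15 ∈ pvL tag ↔ (List.any ["DNG", "Dng", "dng"] (fun x => PySem.Str.isIn x tag)) = true := by
  simp [pvL, pvPrefix, pvSub, PySem.List.mem_pyRange_one, and_or_left, exists_or]
  simp only [← String.length_toList]
  rw [pv_hit tag.toList ['D', 'N', 'G'] (by decide),
    pv_hit tag.toList ['D', 'n', 'g'] (by decide),
    pv_hit tag.toList ['d', 'n', 'g'] (by decide)]

lemma pv_mem16 (tag : String) : 16 ∈ pvL tag ↔ (List.any ["RAW", "Raw", "raw"] (fun x => PySem.Str.isIn x tag)) = true := by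
  simp [pvL, pvPrefix, pvSub, PySem.List.mem_pyRange_one, and_or_left, exists_or]
  simp only [← String.length_toList]
  rw [pv_hit tag.toList ['R', 'A', 'W'] (by decide),
    pv_hit tag.toList ['R', 'a', 'w'] (by decide),
    pv_hit tag.toList ['r', 'a', 'w'] (by decide)]

lemma pv_mem17 (tag : String) : 17 ∈ pvL tag ↔ (List.any ["MOV", "Mov", "mov", "MP4", "Mp4", "mp4", "AVI", "Avi", "avi", "MKV", "Mkv", "mkv"] (fun x => PySem.Str.isIn x tag)) = true := by
  simp [pvL, pvPrefix, pvSub, PySem.List.mem_pyRange_one, and_or_left, exists_or]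
  simp only [← String.length_toList]
  rw [pv_hit tag.toList ['M', 'O', 'V'] (by decide),
    pv_hit tag.toList ['M', 'o', 'v'] (by decide),
    pv_hit tag.toList ['m', 'o', 'v'] (by decide),
    pv_hit tag.toList ['M', 'P', '4'] (by decide),
    pv_hit tag.toList ['M', 'p', '4'] (by decide),
    pv_hit tag.toList ['m', 'p', '4'] (by decide),
    pv_hit tag.toList ['A', 'V', 'I'] (by decide),
    pv_hit tag.toList ['A', 'v', 'i'] (by decide),
    pv_hit tag.toList ['a', 'v', 'i'] (by decide),
    pv_hit tag.toList ['M', 'K', 'V'] (by decide),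
    pv_hit tag.toList ['M', 'k', 'v'] (by decide),
    pv_hit tag.toList ['m', 'k', 'v'] (by decide)]

lemma pv_mem18 (tag : String) : 18 ∈ pvL tag ↔ (List.any ["MP3", "Mp3", "mp3", "WAV", "Wav", "wav", "AAC", "Aac", "aac", "FLAC", "Flac", "flac"] (fun x => PySem.Str.isIn x tag)) = true := by
  simp [pvL, pvPrefix, pvSub, PySem.List.mem_pyRange_one, and_or_left, exists_or]
  simp only [← String.length_toList]
  rw [pv_hit tag.toList ['M', 'P', '3'] (by decide),
    pv_hit tag.toList ['M', 'p', '3'] (by decide),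
    pv_hit tag.toList ['m', 'p', '3'] (by decide),
    pv_hit tag.toList ['W', 'A', 'V'] (by decide),
    pv_hit tag.toList ['W', 'a', 'v'] (by decide),
    pv_hit tag.toList ['w', 'a', 'v'] (by decide),
    pv_hit tag.toList ['A', 'A', 'C'] (by decide),
    pv_hit tag.toList ['A', 'a', 'c'] (by decide),
    pv_hit tag.toList ['a', 'a', 'c'] (by decide),
    pv_hit tag.toList ['F', 'L', 'A', 'C'] (by decide),
    pv_hit tag.toList ['F', 'l', 'a', 'c'] (by decide),
    pv_hit tag.toList ['f', 'l', 'a', 'c'] (by decide)]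

-- ===== VERDICT (by name: the statement is the Claim_ definition above) =====
theorem categorize_tag_spec : Claim_equal_categorize_tag := by
  intro tag _
  unfold Spec_categorize_tag
  rw [pv_alt_eq]
  by_cases h0 : (PySem.Str.startswith tag "Canon" || PySem.Str.startswith tag "Canon") = true
  · have hnot : ∀ j, j < 0 → j ∉ pvL tag := by
      intro j hj hmem
      omega
    have hm : List.foldl min 19 (pvL tag) = 0 :=
      pv_min_eq (pvL tag) 19 0 (by omega) ((pv_mem0 tag).mpr h0) hnot
    simp at h0
    simp [categorize_tag, hm, pvCats, h0]
  ·
    by_cases h1 : (PySem.Str.startswith tag "Nikon" || PySem.Str.startswith tag "Nikon") = true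
    · have hnot : ∀ j, j < 1 → j ∉ pvL tag := by
        intro j hj hmem
        interval_cases j
        · exact h0 ((pv_mem0 tag).mp hmem)
      have hm : List.foldl min 19 (pvL tag) = 1 :=
        pv_min_eq (pvL tag) 19 1 (by omega) ((pv_mem1 tag).mpr h1) hnot
      simp at h0 h1
      simp [categorize_tag, hm, pvCats, h0, h1]
    ·
      by_cases h2 : (PySem.Str.startswith tag "Sony" || PySem.Str.startswith tag "Sony") = true
      · have hnot : ∀ j, j < 2 → j ∉ pvL tag := by
          intro j hj hmem
          interval_cases j
          · exact h0 ((pv_mem0 tag).mp hmem)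
          · exact h1 ((pv_mem1 tag).mp hmem)
        have hm : List.foldl min 19 (pvL tag) = 2 :=
          pv_min_eq (pvL tag) 19 2 (by omega) ((pv_mem2 tag).mpr h2) hnot
        simp at h0 h1 h2
        simp [categorize_tag, hm, pvCats, h0, h1, h2]
      ·
        by_cases h3 : (PySem.Str.startswith tag "Fuji" || PySem.Str.startswith tag "Fuji" || PySem.Str.startswith tag "Fujifilm") = true
        · have hnot : ∀ j, j < 3 → j ∉ pvL tag := by
            intro j hj hmem
            interval_cases j
            · exact h0 ((pv_mem0 tag).mp hmem)
            · exact h1 ((pv_mem1 tag).mp hmem)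
            · exact h2 ((pv_mem2 tag).mp hmem)
          have hm : List.foldl min 19 (pvL tag) = 3 :=
            pv_min_eq (pvL tag) 19 3 (by omega) ((pv_mem3 tag).mpr h3) hnot
          simp at h0 h1 h2 h3
          simp [categorize_tag, hm, pvCats, h0, h1, h2, h3]
        ·
          by_cases h4 : (PySem.Str.startswith tag "Olympus" || PySem.Str.startswith tag "Olympus") = true
          · have hnot : ∀ j, j < 4 → j ∉ pvL tag := by
              intro j hj hmem
              interval_cases j
              · exact h0 ((pv_mem0 tag).mp hmem)
              · exact h1 ((pv_mem1 tag).mp hmem)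
              · exact h2 ((pv_mem2 tag).mp hmem)
              · exact h3 ((pv_mem3 tag).mp hmem)
            have hm : List.foldl min 19 (pvL tag) = 4 :=
              pv_min_eq (pvL tag) 19 4 (by omega) ((pv_mem4 tag).mpr h4) hnot
            simp at h0 h1 h2 h3 h4
            simp [categorize_tag, hm, pvCats, h0, h1, h2, h3, h4]
          ·
            by_cases h5 : (PySem.Str.startswith tag "Panasonic" || PySem.Str.startswith tag "Panasonic") = true
            · have hnot : ∀ j, j < 5 → j ∉ pvL tag := by
                intro j hj hmem
                interval_cases j
                · exact h0 ((pv_mem0 tag).mp hmem)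
                · exact h1 ((pv_mem1 tag).mp hmem)
                · exact h2 ((pv_mem2 tag).mp hmem)
                · exact h3 ((pv_mem3 tag).mp hmem)
                · exact h4 ((pv_mem4 tag).mp hmem)
              have hm : List.foldl min 19 (pvL tag) = 5 :=
                pv_min_eq (pvL tag) 19 5 (by omega) ((pv_mem5 tag).mpr h5) hnot
              simp at h0 h1 h2 h3 h4 h5
              simp [categorize_tag, hm, pvCats, h0, h1, h2, h3, h4, h5]
            ·
              by_cases h6 : (List.any ["EXIF", "Exif", "exif"] (fun x => PySem.Str.isIn x tag)) = true
              · have hnot : ∀ j, j < 6 → j ∉ pvL tag := by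
                  intro j hj hmem
                  interval_cases j
                  · exact h0 ((pv_mem0 tag).mp hmem)
                  · exact h1 ((pv_mem1 tag).mp hmem)
                  · exact h2 ((pv_mem2 tag).mp hmem)
                  · exact h3 ((pv_mem3 tag).mp hmem)
                  · exact h4 ((pv_mem4 tag).mp hmem)
                  · exact h5 ((pv_mem5 tag).mp hmem)
                have hm : List.foldl min 19 (pvL tag) = 6 :=
                  pv_min_eq (pvL tag) 19 6 (by omega) ((pv_mem6 tag).mpr h6) hnot
                simp at h0 h1 h2 h3 h4 h5 h6
                simp [categorize_tag, hm, pvCats, h0, h1, h2, h3, h4, h5, h6]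
              ·
                by_cases h7 : (List.any ["IPTC", "Iptc", "iptc"] (fun x => PySem.Str.isIn x tag)) = true
                · have hnot : ∀ j, j < 7 → j ∉ pvL tag := by
                    intro j hj hmem
                    interval_cases j
                    · exact h0 ((pv_mem0 tag).mp hmem)
                    · exact h1 ((pv_mem1 tag).mp hmem)
                    · exact h2 ((pv_mem2 tag).mp hmem)
                    · exact h3 ((pv_mem3 tag).mp hmem)
                    · exact h4 ((pv_mem4 tag).mp hmem)
                    · exact h5 ((pv_mem5 tag).mp hmem)
                    · exact h6 ((pv_mem6 tag).mp hmem)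
                  have hm : List.foldl min 19 (pvL tag) = 7 :=
                    pv_min_eq (pvL tag) 19 7 (by omega) ((pv_mem7 tag).mpr h7) hnot
                  simp at h0 h1 h2 h3 h4 h5 h6 h7
                  simp [categorize_tag, hm, pvCats, h0, h1, h2, h3, h4, h5, h6, h7]
                ·
                  by_cases h8 : (List.any ["XMP", "Xmp", "xmp"] (fun x => PySem.Str.isIn x tag)) = true
                  · have hnot : ∀ j, j < 8 → j ∉ pvL tag := by
                      intro j hj hmem
                      interval_cases j
                      · exact h0 ((pv_mem0 tag).mp hmem)
                      · exact h1 ((pv_mem1 tag).mp hmem)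
                      · exact h2 ((pv_mem2 tag).mp hmem)
                      · exact h3 ((pv_mem3 tag).mp hmem)
                      · exact h4 ((pv_mem4 tag).mp hmem)
                      · exact h5 ((pv_mem5 tag).mp hmem)
                      · exact h6 ((pv_mem6 tag).mp hmem)
                      · exact h7 ((pv_mem7 tag).mp hmem)
                    have hm : List.foldl min 19 (pvL tag) = 8 :=
                      pv_min_eq (pvL tag) 19 8 (by omega) ((pv_mem8 tag).mpr h8) hnot
                    simp at h0 h1 h2 h3 h4 h5 h6 h7 h8
                    simp [categorize_tag, hm, pvCats, h0, h1, h2, h3, h4, h5, h6, h7, h8]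
                  ·
                    by_cases h9 : (List.any ["GPS", "Gps", "gps"] (fun x => PySem.Str.isIn x tag)) = true
                    · have hnot : ∀ j, j < 9 → j ∉ pvL tag := by
                        intro j hj hmem
                        interval_cases j
                        · exact h0 ((pv_mem0 tag).mp hmem)
                        · exact h1 ((pv_mem1 tag).mp hmem)
                        · exact h2 ((pv_mem2 tag).mp hmem)
                        · exact h3 ((pv_mem3 tag).mp hmem)
                        · exact h4 ((pv_mem4 tag).mp hmem)
                        · exact h5 ((pv_mem5 tag).mp hmem)
                        · exact h6 ((pv_mem6 tag).mp hmem)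
                        · exact h7 ((pv_mem7 tag).mp hmem)
                        · exact h8 ((pv_mem8 tag).mp hmem)
                      have hm : List.foldl min 19 (pvL tag) = 9 :=
                        pv_min_eq (pvL tag) 19 9 (by omega) ((pv_mem9 tag).mpr h9) hnot
                      simp at h0 h1 h2 h3 h4 h5 h6 h7 h8 h9
                      simp [categorize_tag, hm, pvCats, h0, h1, h2, h3, h4, h5, h6, h7, h8, h9]
                    ·
                      by_cases h10 : (List.any ["PDF", "Pdf", "pdf"] (fun x => PySem.Str.isIn x tag)) = true
                      · have hnot : ∀ j, j < 10 → j ∉ pvL tag := by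
                          intro j hj hmem
                          interval_cases j
                          · exact h0 ((pv_mem0 tag).mp hmem)
                          · exact h1 ((pv_mem1 tag).mp hmem)
                          · exact h2 ((pv_mem2 tag).mp hmem)
                          · exact h3 ((pv_mem3 tag).mp hmem)
                          · exact h4 ((pv_mem4 tag).mp hmem)
                          · exact h5 ((pv_mem5 tag).mp hmem)
                          · exact h6 ((pv_mem6 tag).mp hmem)
                          · exact h7 ((pv_mem7 tag).mp hmem)
                          · exact h8 ((pv_mem8 tag).mp hmem)
                          · exact h9 ((pv_mem9 tag).mp hmem)
                        have hm : List.foldl min 19 (pvL tag) = 10 :=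
                          pv_min_eq (pvL tag) 19 10 (by omega) ((pv_mem10 tag).mpr h10) hnot
                        simp at h0 h1 h2 h3 h4 h5 h6 h7 h8 h9 h10
                        simp [categorize_tag, hm, pvCats, h0, h1, h2, h3, h4, h5, h6, h7, h8, h9, h10]
                      ·
                        by_cases h11 : (List.any ["JPEG", "Jpeg", "jpeg", "JPG", "Jpg", "jpg"] (fun x => PySem.Str.isIn x tag)) = true
                        · have hnot : ∀ j, j < 11 → j ∉ pvL tag := by
                            intro j hj hmem
                            interval_cases j
                            · exact h0 ((pv_mem0 tag).mp hmem)
                            · exact h1 ((pv_mem1 tag).mp hmem)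
                            · exact h2 ((pv_mem2 tag).mp hmem)
                            · exact h3 ((pv_mem3 tag).mp hmem)
                            · exact h4 ((pv_mem4 tag).mp hmem)
                            · exact h5 ((pv_mem5 tag).mp hmem)
                            · exact h6 ((pv_mem6 tag).mp hmem)
                            · exact h7 ((pv_mem7 tag).mp hmem)
                            · exact h8 ((pv_mem8 tag).mp hmem)
                            · exact h9 ((pv_mem9 tag).mp hmem)
                            · exact h10 ((pv_mem10 tag).mp hmem)
                          have hm : List.foldl min 19 (pvL tag) = 11 :=
                            pv_min_eq (pvL tag) 19 11 (by omega) ((pv_mem11 tag).mpr h11) hnot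
                          simp at h0 h1 h2 h3 h4 h5 h6 h7 h8 h9 h10 h11
                          simp [categorize_tag, hm, pvCats, h0, h1, h2, h3, h4, h5, h6, h7, h8, h9, h10, h11]
                        ·
                          by_cases h12 : (List.any ["PNG", "Png", "png"] (fun x => PySem.Str.isIn x tag)) = true
                          · have hnot : ∀ j, j < 12 → j ∉ pvL tag := by
                              intro j hj hmem
                              interval_cases j
                              · exact h0 ((pv_mem0 tag).mp hmem)
                              · exact h1 ((pv_mem1 tag).mp hmem)
                              · exact h2 ((pv_mem2 tag).mp hmem)
                              · exact h3 ((pv_mem3 tag).mp hmem)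
                              · exact h4 ((pv_mem4 tag).mp hmem)
                              · exact h5 ((pv_mem5 tag).mp hmem)
                              · exact h6 ((pv_mem6 tag).mp hmem)
                              · exact h7 ((pv_mem7 tag).mp hmem)
                              · exact h8 ((pv_mem8 tag).mp hmem)
                              · exact h9 ((pv_mem9 tag).mp hmem)
                              · exact h10 ((pv_mem10 tag).mp hmem)
                              · exact h11 ((pv_mem11 tag).mp hmem)
                            have hm : List.foldl min 19 (pvL tag) = 12 :=
                              pv_min_eq (pvL tag) 19 12 (by omega) ((pv_mem12 tag).mpr h12) hnot
                            simp at h0 h1 h2 h3 h4 h5 h6 h7 h8 h9 h10 h11 h12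
                            simp [categorize_tag, hm, pvCats, h0, h1, h2, h3, h4, h5, h6, h7, h8, h9, h10, h11, h12]
                          ·
                            by_cases h13 : (List.any ["GIF", "Gif", "gif"] (fun x => PySem.Str.isIn x tag)) = true
                            · have hnot : ∀ j, j < 13 → j ∉ pvL tag := by
                                intro j hj hmem
                                interval_cases j
                                · exact h0 ((pv_mem0 tag).mp hmem)
                                · exact h1 ((pv_mem1 tag).mp hmem)
                                · exact h2 ((pv_mem2 tag).mp hmem)
                                · exact h3 ((pv_mem3 tag).mp hmem)
                                · exact h4 ((pv_mem4 tag).mp hmem)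
                                · exact h5 ((pv_mem5 tag).mp hmem)
                                · exact h6 ((pv_mem6 tag).mp hmem)
                                · exact h7 ((pv_mem7 tag).mp hmem)
                                · exact h8 ((pv_mem8 tag).mp hmem)
                                · exact h9 ((pv_mem9 tag).mp hmem)
                                · exact h10 ((pv_mem10 tag).mp hmem)
                                · exact h11 ((pv_mem11 tag).mp hmem)
                                · exact h12 ((pv_mem12 tag).mp hmem)
                              have hm : List.foldl min 19 (pvL tag) = 13 :=
                                pv_min_eq (pvL tag) 19 13 (by omega) ((pv_mem13 tag).mpr h13) hnot
                              simp at h0 h1 h2 h3 h4 h5 h6 h7 h8 h9 h10 h11 h12 h13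
                              simp [categorize_tag, hm, pvCats, h0, h1, h2, h3, h4, h5, h6, h7, h8, h9, h10, h11, h12, h13]
                            ·
                              by_cases h14 : (List.any ["TIFF", "Tiff", "tiff"] (fun x => PySem.Str.isIn x tag)) = true
                              · have hnot : ∀ j, j < 14 → j ∉ pvL tag := by
                                  intro j hj hmem
                                  interval_cases j
                                  · exact h0 ((pv_mem0 tag).mp hmem)
                                  · exact h1 ((pv_mem1 tag).mp hmem)
                                  · exact h2 ((pv_mem2 tag).mp hmem)
                                  · exact h3 ((pv_mem3 tag).mp hmem)
                                  · exact h4 ((pv_mem4 tag).mp hmem)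
                                  · exact h5 ((pv_mem5 tag).mp hmem)
                                  · exact h6 ((pv_mem6 tag).mp hmem)
                                  · exact h7 ((pv_mem7 tag).mp hmem)
                                  · exact h8 ((pv_mem8 tag).mp hmem)
                                  · exact h9 ((pv_mem9 tag).mp hmem)
                                  · exact h10 ((pv_mem10 tag).mp hmem)
                                  · exact h11 ((pv_mem11 tag).mp hmem)
                                  · exact h12 ((pv_mem12 tag).mp hmem)
                                  · exact h13 ((pv_mem13 tag).mp hmem)
                                have hm : List.foldl min 19 (pvL tag) = 14 :=
                                  pv_min_eq (pvL tag) 19 14 (by omega) ((pv_mem14 tag).mpr h14) hnot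
                                simp at h0 h1 h2 h3 h4 h5 h6 h7 h8 h9 h10 h11 h12 h13 h14
                                simp [categorize_tag, hm, pvCats, h0, h1, h2, h3, h4, h5, h6, h7, h8, h9, h10, h11, h12, h13, h14]
                              ·
                                by_cases h15 : (List.any ["DNG", "Dng", "dng"] (fun x => PySem.Str.isIn x tag)) = true
                                · have hnot : ∀ j, j < 15 → j ∉ pvL tag := by
                                    intro j hj hmem
                                    interval_cases j
                                    · exact h0 ((pv_mem0 tag).mp hmem)
                                    · exact h1 ((pv_mem1 tag).mp hmem)
                                    · exact h2 ((pv_mem2 tag).mp hmem)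
                                    · exact h3 ((pv_mem3 tag).mp hmem)
                                    · exact h4 ((pv_mem4 tag).mp hmem)
                                    · exact h5 ((pv_mem5 tag).mp hmem)
                                    · exact h6 ((pv_mem6 tag).mp hmem)
                                    · exact h7 ((pv_mem7 tag).mp hmem)
                                    · exact h8 ((pv_mem8 tag).mp hmem)
                                    · exact h9 ((pv_mem9 tag).mp hmem)
                                    · exact h10 ((pv_mem10 tag).mp hmem)
                                    · exact h11 ((pv_mem11 tag).mp hmem)
                                    · exact h12 ((pv_mem12 tag).mp hmem)
                                    · exact h13 ((pv_mem13 tag).mp hmem)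
                                    · exact h14 ((pv_mem14 tag).mp hmem)
                                  have hm : List.foldl min 19 (pvL tag) = 15 :=
                                    pv_min_eq (pvL tag) 19 15 (by omega) ((pv_mem15 tag).mpr h15) hnot
                                  simp at h0 h1 h2 h3 h4 h5 h6 h7 h8 h9 h10 h11 h12 h13 h14 h15
                                  simp [categorize_tag, hm, pvCats, h0, h1, h2, h3, h4, h5, h6, h7, h8, h9, h10, h11, h12, h13, h14, h15]
                                ·
                                  by_cases h16 : (List.any ["RAW", "Raw", "raw"] (fun x => PySem.Str.isIn x tag)) = true
                                  · have hnot : ∀ j, j < 16 → j ∉ pvL tag := by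
                                      intro j hj hmem
                                      interval_cases j
                                      · exact h0 ((pv_mem0 tag).mp hmem)
                                      · exact h1 ((pv_mem1 tag).mp hmem)
                                      · exact h2 ((pv_mem2 tag).mp hmem)
                                      · exact h3 ((pv_mem3 tag).mp hmem)
                                      · exact h4 ((pv_mem4 tag).mp hmem)
                                      · exact h5 ((pv_mem5 tag).mp hmem)
                                      · exact h6 ((pv_mem6 tag).mp hmem)
                                      · exact h7 ((pv_mem7 tag).mp hmem)
                                      · exact h8 ((pv_mem8 tag).mp hmem)
                                      · exact h9 ((pv_mem9 tag).mp hmem)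
                                      · exact h10 ((pv_mem10 tag).mp hmem)
                                      · exact h11 ((pv_mem11 tag).mp hmem)
                                      · exact h12 ((pv_mem12 tag).mp hmem)
                                      · exact h13 ((pv_mem13 tag).mp hmem)
                                      · exact h14 ((pv_mem14 tag).mp hmem)
                                      · exact h15 ((pv_mem15 tag).mp hmem)
                                    have hm : List.foldl min 19 (pvL tag) = 16 :=
                                      pv_min_eq (pvL tag) 19 16 (by omega) ((pv_mem16 tag).mpr h16) hnot
                                    simp at h0 h1 h2 h3 h4 h5 h6 h7 h8 h9 h10 h11 h12 h13 h14 h15 h16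
                                    simp [categorize_tag, hm, pvCats, h0, h1, h2, h3, h4, h5, h6, h7, h8, h9, h10, h11, h12, h13, h14, h15, h16]
                                  ·
                                    by_cases h17 : (List.any ["MOV", "Mov", "mov", "MP4", "Mp4", "mp4", "AVI", "Avi", "avi", "MKV", "Mkv", "mkv"] (fun x => PySem.Str.isIn x tag)) = true
                                    · have hnot : ∀ j, j < 17 → j ∉ pvL tag := by
                                        intro j hj hmem
                                        interval_cases j
                                        · exact h0 ((pv_mem0 tag).mp hmem)
                                        · exact h1 ((pv_mem1 tag).mp hmem)
                                        · exact h2 ((pv_mem2 tag).mp hmem)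
                                        · exact h3 ((pv_mem3 tag).mp hmem)
                                        · exact h4 ((pv_mem4 tag).mp hmem)
                                        · exact h5 ((pv_mem5 tag).mp hmem)
                                        · exact h6 ((pv_mem6 tag).mp hmem)
                                        · exact h7 ((pv_mem7 tag).mp hmem)
                                        · exact h8 ((pv_mem8 tag).mp hmem)
                                        · exact h9 ((pv_mem9 tag).mp hmem)
                                        · exact h10 ((pv_mem10 tag).mp hmem)
                                        · exact h11 ((pv_mem11 tag).mp hmem)
                                        · exact h12 ((pv_mem12 tag).mp hmem)
                                        · exact h13 ((pv_mem13 tag).mp hmem)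
                                        · exact h14 ((pv_mem14 tag).mp hmem)
                                        · exact h15 ((pv_mem15 tag).mp hmem)
                                        · exact h16 ((pv_mem16 tag).mp hmem)
                                      have hm : List.foldl min 19 (pvL tag) = 17 :=
                                        pv_min_eq (pvL tag) 19 17 (by omega) ((pv_mem17 tag).mpr h17) hnot
                                      simp at h0 h1 h2 h3 h4 h5 h6 h7 h8 h9 h10 h11 h12 h13 h14 h15 h16 h17
                                      simp [categorize_tag, hm, pvCats, h0, h1, h2, h3, h4, h5, h6, h7, h8, h9, h10, h11, h12, h13, h14, h15, h16, h17]
                                    ·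
                                      by_cases h18 : (List.any ["MP3", "Mp3", "mp3", "WAV", "Wav", "wav", "AAC", "Aac", "aac", "FLAC", "Flac", "flac"] (fun x => PySem.Str.isIn x tag)) = true
                                      · have hnot : ∀ j, j < 18 → j ∉ pvL tag := by
                                          intro j hj hmem
                                          interval_cases j
                                          · exact h0 ((pv_mem0 tag).mp hmem)
                                          · exact h1 ((pv_mem1 tag).mp hmem)
                                          · exact h2 ((pv_mem2 tag).mp hmem)
                                          · exact h3 ((pv_mem3 tag).mp hmem)
                                          · exact h4 ((pv_mem4 tag).mp hmem)
                                          · exact h5 ((pv_mem5 tag).mp hmem)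
                                          · exact h6 ((pv_mem6 tag).mp hmem)
                                          · exact h7 ((pv_mem7 tag).mp hmem)
                                          · exact h8 ((pv_mem8 tag).mp hmem)
                                          · exact h9 ((pv_mem9 tag).mp hmem)
                                          · exact h10 ((pv_mem10 tag).mp hmem)
                                          · exact h11 ((pv_mem11 tag).mp hmem)
                                          · exact h12 ((pv_mem12 tag).mp hmem)
                                          · exact h13 ((pv_mem13 tag).mp hmem)
                                          · exact h14 ((pv_mem14 tag).mp hmem)
                                          · exact h15 ((pv_mem15 tag).mp hmem)
                                          · exact h16 ((pv_mem16 tag).mp hmem)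
                                          · exact h17 ((pv_mem17 tag).mp hmem)
                                        have hm : List.foldl min 19 (pvL tag) = 18 :=
                                          pv_min_eq (pvL tag) 19 18 (by omega) ((pv_mem18 tag).mpr h18) hnot
                                        simp at h0 h1 h2 h3 h4 h5 h6 h7 h8 h9 h10 h11 h12 h13 h14 h15 h16 h17 h18
                                        simp [categorize_tag, hm, pvCats, h0, h1, h2, h3, h4, h5, h6, h7, h8, h9, h10, h11, h12, h13, h14, h15, h16, h17, h18]
                                      · -- nothing matched
                                        have hnone : ∀ x, x ∉ pvL tag := by
                                          intro x hx
                                          have hb := pv_L_lt tag x hx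
                                          interval_cases x
                                          · exact h0 ((pv_mem0 tag).mp hx)
                                          · exact h1 ((pv_mem1 tag).mp hx)
                                          · exact h2 ((pv_mem2 tag).mp hx)
                                          · exact h3 ((pv_mem3 tag).mp hx)
                                          · exact h4 ((pv_mem4 tag).mp hx)
                                          · exact h5 ((pv_mem5 tag).mp hx)
                                          · exact h6 ((pv_mem6 tag).mp hx)
                                          · exact h7 ((pv_mem7 tag).mp hx)
                                          · exact h8 ((pv_mem8 tag).mp hx)
                                          · exact h9 ((pv_mem9 tag).mp hx)
                                          · exact h10 ((pv_mem10 tag).mp hx)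
                                          · exact h11 ((pv_mem11 tag).mp hx)
                                          · exact h12 ((pv_mem12 tag).mp hx)
                                          · exact h13 ((pv_mem13 tag).mp hx)
                                          · exact h14 ((pv_mem14 tag).mp hx)
                                          · exact h15 ((pv_mem15 tag).mp hx)
                                          · exact h16 ((pv_mem16 tag).mp hx)
                                          · exact h17 ((pv_mem17 tag).mp hx)
                                          · exact h18 ((pv_mem18 tag).mp hx)
                                        have hm : List.foldl min 19 (pvL tag) = 19 := by
                                          rcases pv_foldl_min_mem_or (pvL tag) 19 with h | h
                                          · exact h
                                          · exact absurd h (hnone _)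
                                        simp at h0 h1 h2 h3 h4 h5 h6 h7 h8 h9 h10 h11 h12 h13 h14 h15 h16 h17 h18
                                        simp [categorize_tag, hm, h0, h1, h2, h3, h4, h5, h6, h7, h8, h9, h10, h11, h12, h13, h14, h15, h16, h17, h18]
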